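-- pv_equiv track=rewrite | github.com/xMSEB/xMSEB | metrics/voxel_based_edge_density.py | bresenham_3d
-- ===== SOURCE A (Python) =====
-- def bresenham_3d(start, end):
--     """Generates all voxels along a 3D line from start to end using Bresenham's algorithm."""
--     x1, y1, z1 = map(int, start)
--     x2, y2, z2 = map(int, end)
--
--     voxels = []
--
--     dx = abs(x2 - x1)
--     dy = abs(y2 - y1)
--     dz = abs(z2 - z1)
--
--     xs = 1 if x2 > x1 else -1
--     ys = 1 if y2 > y1 else -1
--     zs = 1 if z2 > z1 else -1
--
--     x, y, z = x1, y1, z1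
--
--     # Driving axis is X-axis
--     if dx >= dy and dx >= dz:
--         p1 = 2 * dy - dx
--         p2 = 2 * dz - dx
--         for _ in range(dx + 1):
--             voxels.append((x, y, z))
--             if p1 >= 0:
--                 y += ys
--                 p1 -= 2 * dx
--             if p2 >= 0:
--                 z += zs
--                 p2 -= 2 * dx
--             p1 += 2 * dy
--             p2 += 2 * dz
--             x += xs
--
--     # Driving axis is Y-axis
--     elif dy >= dx and dy >= dz:
--         p1 = 2 * dx - dy
--         p2 = 2 * dz - dy
--         for _ in range(dy + 1):
--             voxels.append((x, y, z))
--             if p1 >= 0: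
--                 x += xs
--                 p1 -= 2 * dy
--             if p2 >= 0:
--                 z += zs
--                 p2 -= 2 * dy
--             p1 += 2 * dx
--             p2 += 2 * dz
--             y += ys
--
--     # Driving axis is Z-axis
--     else:
--         p1 = 2 * dy - dz
--         p2 = 2 * dx - dz
--         for _ in range(dz + 1):
--             voxels.append((x, y, z))
--             if p1 >= 0:
--                 y += ys
--                 p1 -= 2 * dz
--             if p2 >= 0:
--                 x += xs
--                 p2 -= 2 * dz
--             p1 += 2 * dy
--             p2 += 2 * dx
--             z += zs
--
--     return voxels
-- ===== SOURCE B (Python) =====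
-- def bresenham_3d(start, end):
--     """Generates all voxels along a 3D line from start to end, computing each
--     voxel directly from its index along the driving axis (stateless closed form)."""
--     x1, y1, z1 = map(int, start)
--     x2, y2, z2 = map(int, end)
--
--     dx = abs(x2 - x1)
--     dy = abs(y2 - y1)
--     dz = abs(z2 - z1)
--
--     xs = 1 if x2 > x1 else -1
--     ys = 1 if y2 > y1 else -1
--     zs = 1 if z2 > z1 else -1
--
--     if dx >= dy and dx >= dz:
--         if dx == 0:
--             return [(x1, y1, z1)]
--         return [(x1 + xs * i,
--                  y1 + ys * ((2 * dy * i + dx) // (2 * dx)),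
--                  z1 + zs * ((2 * dz * i + dx) // (2 * dx)))
--                 for i in range(dx + 1)]
--     elif dy >= dx and dy >= dz:
--         return [(x1 + xs * ((2 * dx * i + dy) // (2 * dy)),
--                  y1 + ys * i,
--                  z1 + zs * ((2 * dz * i + dy) // (2 * dy)))
--                 for i in range(dy + 1)]
--     else:
--         return [(x1 + xs * ((2 * dx * i + dz) // (2 * dz)),
--                  y1 + ys * ((2 * dy * i + dz) // (2 * dz)),
--                  z1 + zs * i)
--                 for i in range(dz + 1)]
-- ===== Notes on version B (the rewrite author's own statement) =====
-- stated objective: alternative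
-- what changed: A's stateful Bresenham loops with running error accumulators p1/p2 are replaced by a stateless closed form: each voxel is computed directly from its index i along the driving axis via integer floor division (e.g. y = y1 + ys*((2*dy*i + dx)//(2*dx))), eliminating all loop-carried state.
import Mathlib
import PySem

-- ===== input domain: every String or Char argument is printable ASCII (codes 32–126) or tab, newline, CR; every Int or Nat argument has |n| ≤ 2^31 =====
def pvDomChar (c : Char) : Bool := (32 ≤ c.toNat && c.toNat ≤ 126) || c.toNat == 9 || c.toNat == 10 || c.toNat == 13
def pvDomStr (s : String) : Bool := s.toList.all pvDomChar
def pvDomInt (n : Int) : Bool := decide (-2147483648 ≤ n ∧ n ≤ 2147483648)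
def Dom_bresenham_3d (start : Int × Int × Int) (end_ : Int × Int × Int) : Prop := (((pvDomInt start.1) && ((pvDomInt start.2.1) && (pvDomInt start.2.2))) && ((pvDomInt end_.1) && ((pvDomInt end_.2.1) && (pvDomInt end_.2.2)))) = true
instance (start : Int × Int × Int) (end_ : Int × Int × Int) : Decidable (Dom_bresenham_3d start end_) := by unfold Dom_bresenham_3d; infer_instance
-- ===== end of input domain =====

-- B replaces A's stateful error-accumulator loops with a stateless closed form: each voxel is
-- computed directly from its index along the driving axis by integer floor division (objective:
-- alternative — same O(D) cost, no running state).

-- ===== PORT A =====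
-- the three driving-axis loops of A, one helper each; fuel is the Python range length
def pvLoopX (dx dy dz xs ys zs : Int) : Nat → Int → Int → Int → Int → Int → List (Int × Int × Int)
  | 0, _x, _y, _z, _p1, _p2 => []
  | Nat.succ n, x, y, z, p1, p2 =>
      (x, y, z) ::
        pvLoopX dx dy dz xs ys zs n (x + xs)
          (if 0 ≤ p1 then y + ys else y)
          (if 0 ≤ p2 then z + zs else z)
          ((if 0 ≤ p1 then p1 - 2 * dx else p1) + 2 * dy)
          ((if 0 ≤ p2 then p2 - 2 * dx else p2) + 2 * dz)

def pvLoopY (dx dy dz xs ys zs : Int) : Nat → Int → Int → Int → Int → Int → List (Int × Int × Int)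
  | 0, _x, _y, _z, _p1, _p2 => []
  | Nat.succ n, x, y, z, p1, p2 =>
      (x, y, z) ::
        pvLoopY dx dy dz xs ys zs n
          (if 0 ≤ p1 then x + xs else x)
          (y + ys)
          (if 0 ≤ p2 then z + zs else z)
          ((if 0 ≤ p1 then p1 - 2 * dy else p1) + 2 * dx)
          ((if 0 ≤ p2 then p2 - 2 * dy else p2) + 2 * dz)

def pvLoopZ (dx dy dz xs ys zs : Int) : Nat → Int → Int → Int → Int → Int → List (Int × Int × Int)
  | 0, _x, _y, _z, _p1, _p2 => []
  | Nat.succ n, x, y, z, p1, p2 =>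
      (x, y, z) ::
        pvLoopZ dx dy dz xs ys zs n
          (if 0 ≤ p2 then x + xs else x)
          (if 0 ≤ p1 then y + ys else y)
          (z + zs)
          ((if 0 ≤ p1 then p1 - 2 * dz else p1) + 2 * dy)
          ((if 0 ≤ p2 then p2 - 2 * dz else p2) + 2 * dx)

def bresenham_3d (start : Int × Int × Int) (end_ : Int × Int × Int) : List (Int × Int × Int) :=
  let x1 := start.1; let y1 := start.2.1; let z1 := start.2.2
  let x2 := end_.1; let y2 := end_.2.1; let z2 := end_.2.2
  let dx := |x2 - x1|
  let dy := |y2 - y1|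
  let dz := |z2 - z1|
  let xs : Int := if x1 < x2 then 1 else -1
  let ys : Int := if y1 < y2 then 1 else -1
  let zs : Int := if z1 < z2 then 1 else -1
  if dy ≤ dx ∧ dz ≤ dx then
    pvLoopX dx dy dz xs ys zs (dx + 1).toNat x1 y1 z1 (2 * dy - dx) (2 * dz - dx)
  else if dx ≤ dy ∧ dz ≤ dy then
    pvLoopY dx dy dz xs ys zs (dy + 1).toNat x1 y1 z1 (2 * dx - dy) (2 * dz - dy)
  else
    pvLoopZ dx dy dz xs ys zs (dz + 1).toNat x1 y1 z1 (2 * dy - dz) (2 * dx - dz)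

-- ===== PORT B =====
def bresenham_3d_alt (start : Int × Int × Int) (end_ : Int × Int × Int) : List (Int × Int × Int) :=
  let x1 := start.1; let y1 := start.2.1; let z1 := start.2.2
  let x2 := end_.1; let y2 := end_.2.1; let z2 := end_.2.2
  let dx := |x2 - x1|
  let dy := |y2 - y1|
  let dz := |z2 - z1|
  let xs : Int := if x1 < x2 then 1 else -1
  let ys : Int := if y1 < y2 then 1 else -1
  let zs : Int := if z1 < z2 then 1 else -1
  if dy ≤ dx ∧ dz ≤ dx then
    if dx = 0 then [(x1, y1, z1)]
    else
      (PySem.List.pyRange 0 (dx + 1) 1).map (fun i =>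
        (x1 + xs * i,
         y1 + ys * PySem.Int.floordiv (2 * dy * i + dx) (2 * dx),
         z1 + zs * PySem.Int.floordiv (2 * dz * i + dx) (2 * dx)))
  else if dx ≤ dy ∧ dz ≤ dy then
    (PySem.List.pyRange 0 (dy + 1) 1).map (fun i =>
      (x1 + xs * PySem.Int.floordiv (2 * dx * i + dy) (2 * dy),
       y1 + ys * i,
       z1 + zs * PySem.Int.floordiv (2 * dz * i + dy) (2 * dy)))
  else
    (PySem.List.pyRange 0 (dz + 1) 1).map (fun i =>
      (x1 + xs * PySem.Int.floordiv (2 * dx * i + dz) (2 * dz),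
       y1 + ys * PySem.Int.floordiv (2 * dy * i + dz) (2 * dz),
       z1 + zs * i))

-- ===== PRECONDITION & SPEC =====
def Spec_bresenham_3d (start : Int × Int × Int) (end_ : Int × Int × Int) (out : List (Int × Int × Int)) : Prop := out = bresenham_3d_alt start end_
instance (start : Int × Int × Int) (end_ : Int × Int × Int) (out : List (Int × Int × Int)) : Decidable (Spec_bresenham_3d start end_ out) := by unfold Spec_bresenham_3d; infer_instance

-- ===== CLAIM (what is proved, stated in full; the proofs are below) =====
def Claim_equal_bresenham_3d : Prop := ∀ (start : Int × Int × Int) (end_ : Int × Int × Int), Dom_bresenham_3d start end_ → Spec_bresenham_3d start end_ (bresenham_3d start end_)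

-- ===== LEMMAS AND PROOFS =====

-- closed-form follower coordinate: number of follower steps after i driving steps
def pvCF (d dd i : Int) : Int := PySem.Int.floordiv (2 * dd * i + d) (2 * d)

lemma pvCF_zero (d dd : Int) (hd : 0 < d) : pvCF d dd 0 = 0 := by
  unfold pvCF
  rw [PySem.Int.floordiv_eq_iff_of_pos (by omega)]
  constructor <;> nlinarith

lemma pvCF_step (d dd i : Int) (hd : 0 < d) (h0 : 0 ≤ dd) (h1 : dd ≤ d) :
    pvCF d dd (i + 1) =
      if 0 ≤ 2 * dd * (i + 1) - d - 2 * d * pvCF d dd i then pvCF d dd i + 1 else pvCF d dd i := by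
  obtain ⟨q, hqdef⟩ : ∃ q, pvCF d dd i = q := ⟨_, rfl⟩
  have hq : q * (2 * d) ≤ 2 * dd * i + d ∧ 2 * dd * i + d < (q + 1) * (2 * d) :=
    (PySem.Int.floordiv_eq_iff_of_pos (by omega)).mp hqdef
  rw [hqdef]
  unfold pvCF
  split
  next h =>
    rw [PySem.Int.floordiv_eq_iff_of_pos (by omega)]
    constructor <;> nlinarith [hq.1, hq.2]
  next h =>
    rw [PySem.Int.floordiv_eq_iff_of_pos (by omega)]
    constructor <;> nlinarith [hq.1, hq.2]

lemma pvLoopX_eq (dx dy dz xs ys zs x1 y1 z1 : Int) (hdx : 0 < dx)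
    (hy0 : 0 ≤ dy) (hy1 : dy ≤ dx) (hz0 : 0 ≤ dz) (hz1 : dz ≤ dx) :
    ∀ (n : Nat) (i : Int), 0 ≤ i →
      pvLoopX dx dy dz xs ys zs n (x1 + xs * i)
        (y1 + ys * pvCF dx dy i) (z1 + zs * pvCF dx dz i)
        (2 * dy * (i + 1) - dx - 2 * dx * pvCF dx dy i)
        (2 * dz * (i + 1) - dx - 2 * dx * pvCF dx dz i)
      = (PySem.List.pyRange i (i + n) 1).map
          (fun j => (x1 + xs * j, y1 + ys * pvCF dx dy j, z1 + zs * pvCF dx dz j)) := by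
  intro n
  induction n with
  | zero =>
    intro i hi
    rw [PySem.List.pyRange_one_eq_nil (by simp)]
    simp [pvLoopX]
  | succ n ih =>
    intro i hi
    rw [PySem.List.pyRange_one_cons (by push_cast; omega), List.map_cons]
    simp only [pvLoopX]
    have hsy := pvCF_step dx dy i hdx hy0 hy1
    have hsz := pvCF_step dx dz i hdx hz0 hz1
    have ex : x1 + xs * i + xs = x1 + xs * (i + 1) := by ring
    have ey : (if 0 ≤ 2 * dy * (i + 1) - dx - 2 * dx * pvCF dx dy i
        then y1 + ys * pvCF dx dy i + ys else y1 + ys * pvCF dx dy i)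
        = y1 + ys * pvCF dx dy (i + 1) := by rw [hsy]; split <;> ring
    have ez : (if 0 ≤ 2 * dz * (i + 1) - dx - 2 * dx * pvCF dx dz i
        then z1 + zs * pvCF dx dz i + zs else z1 + zs * pvCF dx dz i)
        = z1 + zs * pvCF dx dz (i + 1) := by rw [hsz]; split <;> ring
    have ep1 : (if 0 ≤ 2 * dy * (i + 1) - dx - 2 * dx * pvCF dx dy i
        then 2 * dy * (i + 1) - dx - 2 * dx * pvCF dx dy i - 2 * dx
        else 2 * dy * (i + 1) - dx - 2 * dx * pvCF dx dy i) + 2 * dy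
        = 2 * dy * (i + 1 + 1) - dx - 2 * dx * pvCF dx dy (i + 1) := by
      rw [hsy]; split <;> ring
    have ep2 : (if 0 ≤ 2 * dz * (i + 1) - dx - 2 * dx * pvCF dx dz i
        then 2 * dz * (i + 1) - dx - 2 * dx * pvCF dx dz i - 2 * dx
        else 2 * dz * (i + 1) - dx - 2 * dx * pvCF dx dz i) + 2 * dz
        = 2 * dz * (i + 1 + 1) - dx - 2 * dx * pvCF dx dz (i + 1) := by
      rw [hsz]; split <;> ring
    rw [ex, ey, ez, ep1, ep2, ih (i + 1) (by omega)]
    rw [show i + (((n + 1 : Nat)) : Int) = i + 1 + (n : Nat) by push_cast; ring]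

lemma pvLoopY_eq (dx dy dz xs ys zs x1 y1 z1 : Int) (hdy : 0 < dy)
    (hx0 : 0 ≤ dx) (hx1 : dx ≤ dy) (hz0 : 0 ≤ dz) (hz1 : dz ≤ dy) :
    ∀ (n : Nat) (i : Int), 0 ≤ i →
      pvLoopY dx dy dz xs ys zs n (x1 + xs * pvCF dy dx i)
        (y1 + ys * i) (z1 + zs * pvCF dy dz i)
        (2 * dx * (i + 1) - dy - 2 * dy * pvCF dy dx i)
        (2 * dz * (i + 1) - dy - 2 * dy * pvCF dy dz i)
      = (PySem.List.pyRange i (i + n) 1).map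
          (fun j => (x1 + xs * pvCF dy dx j, y1 + ys * j, z1 + zs * pvCF dy dz j)) := by
  intro n
  induction n with
  | zero =>
    intro i hi
    rw [PySem.List.pyRange_one_eq_nil (by simp)]
    simp [pvLoopY]
  | succ n ih =>
    intro i hi
    rw [PySem.List.pyRange_one_cons (by push_cast; omega), List.map_cons]
    simp only [pvLoopY]
    have hsx := pvCF_step dy dx i hdy hx0 hx1
    have hsz := pvCF_step dy dz i hdy hz0 hz1
    have ey : y1 + ys * i + ys = y1 + ys * (i + 1) := by ring
    have ex : (if 0 ≤ 2 * dx * (i + 1) - dy - 2 * dy * pvCF dy dx i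
        then x1 + xs * pvCF dy dx i + xs else x1 + xs * pvCF dy dx i)
        = x1 + xs * pvCF dy dx (i + 1) := by rw [hsx]; split <;> ring
    have ez : (if 0 ≤ 2 * dz * (i + 1) - dy - 2 * dy * pvCF dy dz i
        then z1 + zs * pvCF dy dz i + zs else z1 + zs * pvCF dy dz i)
        = z1 + zs * pvCF dy dz (i + 1) := by rw [hsz]; split <;> ring
    have ep1 : (if 0 ≤ 2 * dx * (i + 1) - dy - 2 * dy * pvCF dy dx i
        then 2 * dx * (i + 1) - dy - 2 * dy * pvCF dy dx i - 2 * dy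
        else 2 * dx * (i + 1) - dy - 2 * dy * pvCF dy dx i) + 2 * dx
        = 2 * dx * (i + 1 + 1) - dy - 2 * dy * pvCF dy dx (i + 1) := by
      rw [hsx]; split <;> ring
    have ep2 : (if 0 ≤ 2 * dz * (i + 1) - dy - 2 * dy * pvCF dy dz i
        then 2 * dz * (i + 1) - dy - 2 * dy * pvCF dy dz i - 2 * dy
        else 2 * dz * (i + 1) - dy - 2 * dy * pvCF dy dz i) + 2 * dz
        = 2 * dz * (i + 1 + 1) - dy - 2 * dy * pvCF dy dz (i + 1) := by
      rw [hsz]; split <;> ring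
    rw [ey, ex, ez, ep1, ep2, ih (i + 1) (by omega)]
    rw [show i + (((n + 1 : Nat)) : Int) = i + 1 + (n : Nat) by push_cast; ring]

lemma pvLoopZ_eq (dx dy dz xs ys zs x1 y1 z1 : Int) (hdz : 0 < dz)
    (hy0 : 0 ≤ dy) (hy1 : dy ≤ dz) (hx0 : 0 ≤ dx) (hx1 : dx ≤ dz) :
    ∀ (n : Nat) (i : Int), 0 ≤ i →
      pvLoopZ dx dy dz xs ys zs n (x1 + xs * pvCF dz dx i)
        (y1 + ys * pvCF dz dy i) (z1 + zs * i)
        (2 * dy * (i + 1) - dz - 2 * dz * pvCF dz dy i)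
        (2 * dx * (i + 1) - dz - 2 * dz * pvCF dz dx i)
      = (PySem.List.pyRange i (i + n) 1).map
          (fun j => (x1 + xs * pvCF dz dx j, y1 + ys * pvCF dz dy j, z1 + zs * j)) := by
  intro n
  induction n with
  | zero =>
    intro i hi
    rw [PySem.List.pyRange_one_eq_nil (by simp)]
    simp [pvLoopZ]
  | succ n ih =>
    intro i hi
    rw [PySem.List.pyRange_one_cons (by push_cast; omega), List.map_cons]
    simp only [pvLoopZ]
    have hsy := pvCF_step dz dy i hdz hy0 hy1
    have hsx := pvCF_step dz dx i hdz hx0 hx1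
    have ez : z1 + zs * i + zs = z1 + zs * (i + 1) := by ring
    have ey : (if 0 ≤ 2 * dy * (i + 1) - dz - 2 * dz * pvCF dz dy i
        then y1 + ys * pvCF dz dy i + ys else y1 + ys * pvCF dz dy i)
        = y1 + ys * pvCF dz dy (i + 1) := by rw [hsy]; split <;> ring
    have ex : (if 0 ≤ 2 * dx * (i + 1) - dz - 2 * dz * pvCF dz dx i
        then x1 + xs * pvCF dz dx i + xs else x1 + xs * pvCF dz dx i)
        = x1 + xs * pvCF dz dx (i + 1) := by rw [hsx]; split <;> ring
    have ep1 : (if 0 ≤ 2 * dy * (i + 1) - dz - 2 * dz * pvCF dz dy i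
        then 2 * dy * (i + 1) - dz - 2 * dz * pvCF dz dy i - 2 * dz
        else 2 * dy * (i + 1) - dz - 2 * dz * pvCF dz dy i) + 2 * dy
        = 2 * dy * (i + 1 + 1) - dz - 2 * dz * pvCF dz dy (i + 1) := by
      rw [hsy]; split <;> ring
    have ep2 : (if 0 ≤ 2 * dx * (i + 1) - dz - 2 * dz * pvCF dz dx i
        then 2 * dx * (i + 1) - dz - 2 * dz * pvCF dz dx i - 2 * dz
        else 2 * dx * (i + 1) - dz - 2 * dz * pvCF dz dx i) + 2 * dx
        = 2 * dx * (i + 1 + 1) - dz - 2 * dz * pvCF dz dx (i + 1) := by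
      rw [hsx]; split <;> ring
    rw [ez, ey, ex, ep1, ep2, ih (i + 1) (by omega)]
    rw [show i + (((n + 1 : Nat)) : Int) = i + 1 + (n : Nat) by push_cast; ring]

-- ===== VERDICT (by name: the statement is the Claim_ definition above) =====
theorem bresenham_3d_spec : Claim_equal_bresenham_3d := by
  intro start end_ _hdom
  obtain ⟨x1, y1, z1⟩ := start
  obtain ⟨x2, y2, z2⟩ := end_
  unfold Spec_bresenham_3d bresenham_3d bresenham_3d_alt
  dsimp only
  set dx := |x2 - x1| with hdxdef
  set dy := |y2 - y1| with hdydef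
  set dz := |z2 - z1| with hdzdef
  have hdx0 : 0 ≤ dx := abs_nonneg _
  have hdy0 : 0 ≤ dy := abs_nonneg _
  have hdz0 : 0 ≤ dz := abs_nonneg _
  by_cases h1 : dy ≤ dx ∧ dz ≤ dx
  · simp only [if_pos h1]
    by_cases h0 : dx = 0
    · rw [if_pos h0]
      have : (dx + 1).toNat = 1 := by omega
      rw [this]
      simp [pvLoopX]
    · rw [if_neg h0]
      have hdx : 0 < dx := by omega
      have := pvLoopX_eq dx dy dz (if x1 < x2 then 1 else -1) (if y1 < y2 then 1 else -1)
        (if z1 < z2 then 1 else -1) x1 y1 z1 hdx hdy0 h1.1 hdz0 h1.2 (dx + 1).toNat 0 le_rfl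
      rw [pvCF_zero dx dy hdx, pvCF_zero dx dz hdx] at this
      have hrange : (0 : Int) + ((dx + 1).toNat : Int) = dx + 1 := by omega
      rw [hrange] at this
      simp only [mul_zero, add_zero] at this
      have harg1 : 2 * dy * (0 + 1) - dx - 0 = 2 * dy - dx := by ring
      have harg2 : 2 * dz * (0 + 1) - dx - 0 = 2 * dz - dx := by ring
      rw [harg1, harg2] at this
      rw [this]
      simp only [pvCF]
  · simp only [if_neg h1]
    by_cases h2 : dx ≤ dy ∧ dz ≤ dy
    · simp only [if_pos h2]
      have hdy : 0 < dy := by omega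
      have := pvLoopY_eq dx dy dz (if x1 < x2 then 1 else -1) (if y1 < y2 then 1 else -1)
        (if z1 < z2 then 1 else -1) x1 y1 z1 hdy hdx0 h2.1 hdz0 h2.2 (dy + 1).toNat 0 le_rfl
      rw [pvCF_zero dy dx hdy, pvCF_zero dy dz hdy] at this
      have hrange : (0 : Int) + ((dy + 1).toNat : Int) = dy + 1 := by omega
      rw [hrange] at this
      simp only [mul_zero, add_zero] at this
      have harg1 : 2 * dx * (0 + 1) - dy - 0 = 2 * dx - dy := by ring
      have harg2 : 2 * dz * (0 + 1) - dy - 0 = 2 * dz - dy := by ring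
      rw [harg1, harg2] at this
      rw [this]
      simp only [pvCF]
    · simp only [if_neg h2]
      have hdz : 0 < dz := by omega
      have hxz : dx ≤ dz := by omega
      have hyz : dy ≤ dz := by omega
      have := pvLoopZ_eq dx dy dz (if x1 < x2 then 1 else -1) (if y1 < y2 then 1 else -1)
        (if z1 < z2 then 1 else -1) x1 y1 z1 hdz hdy0 hyz hdx0 hxz (dz + 1).toNat 0 le_rfl
      rw [pvCF_zero dz dy hdz, pvCF_zero dz dx hdz] at this
      have hrange : (0 : Int) + ((dz + 1).toNat : Int) = dz + 1 := by omega
      rw [hrange] at this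
      simp only [mul_zero, add_zero] at this
      have harg1 : 2 * dy * (0 + 1) - dz - 0 = 2 * dy - dz := by ring
      have harg2 : 2 * dx * (0 + 1) - dz - 0 = 2 * dx - dz := by ring
      rw [harg1, harg2] at this
      rw [this]
      simp only [pvCF]
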